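-- pv_equiv track=rewrite | github.com/JoJoJoJoJoJoJo/ToolsInDailyWork | app/models.py | cal_leave_amount
-- ===== SOURCE A (Python) =====
-- def cal_leave_amount(hours,minutes):
-- 	sum1 = sum(hours)
-- 	sum2 = sum(minutes)
-- 	while sum2>150:
-- 		m = max(minutes)
-- 		minutes.pop(minutes.index(m))
-- 		sum1 += 1
-- 		sum2 = sum(minutes)
-- 	return 'hours:%s,minutes:%s'%(sum1,sum2)
-- ===== SOURCE B (Python) =====
-- def cal_leave_amount(hours, minutes):
--     s = sum(minutes)
--     k = 0
--     for m in sorted(minutes, reverse=True):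
--         if s <= 150:
--             break
--         s -= m
--         k += 1
--     return 'hours:%s,minutes:%s' % (sum(hours) + k, s)
-- ===== Notes on version B (the rewrite author's own statement) =====
-- stated objective: alternative
-- what changed: Sort minutes descending once and subtract elements with a running sum and a counter, instead of re-scanning for max, re-scanning for its index, popping, and re-summing the whole list on every iteration (O(n log n) vs O(n^2) when many drops happen; A is linear when nothing is dropped, so not claimed faster overall); B also does not mutate the minutes list.
import Mathlib
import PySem

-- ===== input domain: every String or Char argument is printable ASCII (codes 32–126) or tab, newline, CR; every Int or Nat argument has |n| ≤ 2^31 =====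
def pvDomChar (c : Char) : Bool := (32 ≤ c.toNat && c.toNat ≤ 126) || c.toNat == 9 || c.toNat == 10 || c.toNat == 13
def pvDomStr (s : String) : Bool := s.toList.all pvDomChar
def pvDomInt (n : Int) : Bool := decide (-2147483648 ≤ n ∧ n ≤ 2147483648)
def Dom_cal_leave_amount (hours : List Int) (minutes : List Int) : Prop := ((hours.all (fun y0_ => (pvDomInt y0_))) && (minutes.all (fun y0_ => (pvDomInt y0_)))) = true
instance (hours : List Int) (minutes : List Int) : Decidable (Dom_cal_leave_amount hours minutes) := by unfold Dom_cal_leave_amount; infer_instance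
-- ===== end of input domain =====

-- ===== PORT A =====
-- B sorts once and keeps a running sum/counter instead of re-scanning for max and re-summing per iteration (alternative algorithm).
-- A mutates its `minutes` argument in place (pops elements); the equivalence proved here is about the return value only.

-- the while loop of A: while sum(minutes) > 150: m = max(minutes); minutes.pop(minutes.index(m)); sum1 += 1
def calLoopA (minutes : List Int) (sum1 : Int) : Int × Int :=
  if minutes.sum > 150 then
    match PySem.List.max? minutes (fun x => x) with
    | none => (sum1, minutes.sum)          -- unreachable: sum > 150 forces nonempty
    | some m =>
      match PySem.List.index? minutes m with
      | none => (sum1, minutes.sum)        -- unreachable: m ∈ minutes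
      | some i =>
        match hp : PySem.List.pop? minutes (i : Int) with
        | none => (sum1, minutes.sum)      -- unreachable
        | some r => calLoopA r.2 (sum1 + 1)
  else (sum1, minutes.sum)
termination_by minutes.length
decreasing_by
  have := PySem.List.length_of_pop?_eq_some minutes hp
  omega

def cal_leave_amount (hours : List Int) (minutes : List Int) : String :=
  let p := calLoopA minutes hours.sum
  "hours:" ++ PySem.Int.toStr p.1 ++ ",minutes:" ++ PySem.Int.toStr p.2

-- ===== PORT B =====
-- the for loop of B: for m in sorted(minutes, reverse=True): if s <= 150: break; s -= m; k += 1
def calLoopB : List Int → Int → Int → Int × Int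
  | [], s, k => (k, s)
  | m :: rest, s, k => if s ≤ 150 then (k, s) else calLoopB rest (s - m) (k + 1)

def cal_leave_amount_alt (hours : List Int) (minutes : List Int) : String :=
  let p := calLoopB (PySem.List.sorted minutes (fun x => x) true) minutes.sum 0
  "hours:" ++ PySem.Int.toStr (hours.sum + p.1) ++ ",minutes:" ++ PySem.Int.toStr p.2

-- ===== PRECONDITION & SPEC =====
def Spec_cal_leave_amount (hours : List Int) (minutes : List Int) (out : String) : Prop := out = cal_leave_amount_alt hours minutes
instance (hours : List Int) (minutes : List Int) (out : String) : Decidable (Spec_cal_leave_amount hours minutes out) := by unfold Spec_cal_leave_amount; infer_instance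

-- ===== CLAIM (what is proved, stated in full; the proofs are below) =====
def Claim_equal_cal_leave_amount : Prop := ∀ (hours : List Int) (minutes : List Int), Dom_cal_leave_amount hours minutes → Spec_cal_leave_amount hours minutes (cal_leave_amount hours minutes)

-- ===== LEMMAS AND PROOFS =====

-- shifting the counter of B's loop
theorem calLoopB_shift (l : List Int) (s k : Int) :
    calLoopB l s k = ((calLoopB l s 0).1 + k, (calLoopB l s 0).2) := by
  induction l generalizing s k with
  | nil => simp [calLoopB]
  | cons m rest ih =>
    by_cases h : s ≤ 150
    · simp [calLoopB, h]
    · simp only [calLoopB, if_neg h]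
      rw [ih (s - m) (k + 1), ih (s - m) (0 + 1)]
      refine Prod.ext ?_ ?_ <;> simp <;> ring

-- Python max of a nonempty list whose head dominates is the head
theorem max?_cons_of_head_max (h : Int) (t : List Int) (hmax : ∀ x ∈ t, x ≤ h) :
    PySem.List.max? (h :: t) (fun x => x) = some h := by
  rw [PySem.List.max?_id_cons]
  have h1 := (PySem.List.le_foldl_max t h).1
  have h2 : List.foldl max h t = h ∨ List.foldl max h t ∈ t := PySem.List.foldl_max_mem t h
  have h3 : List.foldl max h t ≤ h := by
    rcases h2 with h2 | h2
    · exact le_of_eq h2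
    · exact hmax _ h2
  rw [le_antisymm h3 h1]

-- A's max value is determined by the multiset of the list
theorem max?_of_perm (l l' : List Int) (hp : l.Perm l') :
    PySem.List.max? l (fun x => x) = PySem.List.max? l' (fun x => x) := by
  cases hl : PySem.List.max? l (fun x => x) with
  | none =>
    rw [PySem.List.max?_eq_none_iff] at hl
    subst hl
    rw [hp.symm.eq_nil]
    exact ((PySem.List.max?_eq_none_iff [] _).mpr rfl).symm
  | some m =>
    cases hl' : PySem.List.max? l' (fun x => x) with
    | none =>
      rw [PySem.List.max?_eq_none_iff] at hl'
      subst hl'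
      have hm := PySem.List.max?_mem hl
      rw [hp.eq_nil] at hm
      cases hm
    | some m' =>
      have hm : m ∈ l := PySem.List.max?_mem hl
      have hm' : m' ∈ l' := PySem.List.max?_mem hl'
      have h1 : m ≤ m' := PySem.List.max?_isMax hl' m (hp.mem_iff.mp hm)
      have h2 : m' ≤ m := PySem.List.max?_isMax hl m' (hp.mem_iff.mpr hm')
      rw [le_antisymm h1 h2]

-- the pop of the first occurrence of m (for m ∈ l) is List.erase
theorem pop_index_eq_erase (l : List Int) (m : Int) (hm : m ∈ l) :
    ∃ k : Nat, PySem.List.index? l m = some k ∧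
      PySem.List.pop? l (k : Int) = some (m, l.erase m) := by
  induction l with
  | nil => cases hm
  | cons x t ih =>
    by_cases hx : x = m
    · subst hx
      refine ⟨0, PySem.List.index?_cons_self x t, ?_⟩
      simpa using PySem.List.pop?_zero_cons x t
    · have hm' : m ∈ t := by
        cases hm with
        | head => exact absurd rfl hx
        | tail _ h => exact h
      obtain ⟨k, hk, hpop⟩ := ih hm'
      refine ⟨k + 1, ?_, ?_⟩
      · rw [PySem.List.index?_cons_of_ne t hx, hk]; rfl
      · obtain ⟨hkl, hget, -⟩ := PySem.List.getElem_of_index?_eq_some hk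
        rw [PySem.List.pop?_natCast (x :: t) (k + 1) (by simpa using Nat.succ_lt_succ hkl)]
        have heq := (PySem.List.pop?_natCast t k hkl).symm.trans hpop
        simp only [Option.some.injEq, Prod.mk.injEq] at heq
        simp [List.erase_cons, hx, heq.1, heq.2, hget]

-- A's loop is invariant under permutation of the minutes list
theorem calLoopA_perm (n : Nat) : ∀ (l l' : List Int), l.length ≤ n → l.Perm l' →
    ∀ s1, calLoopA l s1 = calLoopA l' s1 := by
  induction n with
  | zero =>
    intro l l' hlen hp s1
    have hl : l = [] := List.eq_nil_of_length_eq_zero (Nat.le_zero.mp hlen)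
    subst hl
    rw [hp.symm.eq_nil]
  | succ n ih =>
    intro l l' hlen hp s1
    have hsum : l.sum = l'.sum := hp.sum_eq
    by_cases hgt : l.sum > 150
    · have hne : l ≠ [] := by rintro rfl; simp at hgt
      obtain ⟨m, hm⟩ : ∃ m, PySem.List.max? l (fun x => x) = some m := by
        cases h : PySem.List.max? l (fun x => x) with
        | none => exact absurd ((PySem.List.max?_eq_none_iff l _).mp h) hne
        | some m => exact ⟨m, rfl⟩
      have hm' : PySem.List.max? l' (fun x => x) = some m := by
        rw [← max?_of_perm l l' hp]; exact hm
      obtain ⟨k, hk, hpop⟩ := pop_index_eq_erase l m (PySem.List.max?_mem hm)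
      obtain ⟨k', hk', hpop'⟩ := pop_index_eq_erase l' m
        (hp.mem_iff.mp (PySem.List.max?_mem hm))
      have hrec : calLoopA (l.erase m) (s1 + 1) = calLoopA (l'.erase m) (s1 + 1) := by
        apply ih
        · have h1 := l.length_erase_of_mem (PySem.List.max?_mem hm)
          have hpos : 0 < l.length := List.length_pos_iff.mpr hne
          omega
        · exact hp.erase m
      rw [calLoopA.eq_def, calLoopA.eq_def]
      rw [if_pos hgt, if_pos (hsum ▸ hgt)]
      simp only [hm, hm', hk, hk']
      split
      · next heq => rw [hpop] at heq; cases heq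
      · next r heq =>
        rw [hpop] at heq
        injection heq with heq'
        subst heq'
        split
        · next heq2 => rw [hpop'] at heq2; cases heq2
        · next r' heq2 =>
          rw [hpop'] at heq2
          injection heq2 with heq2'
          subst heq2'
          exact hrec
    · rw [calLoopA.eq_def, calLoopA.eq_def, if_neg hgt, if_neg (hsum ▸ hgt), hsum]

-- on a descending-sorted list A's loop is B's loop
theorem calLoopA_sorted (l : List Int) (hs : l.Pairwise (fun a b => b ≤ a)) (s1 : Int) :
    calLoopA l s1 = (s1 + (calLoopB l l.sum 0).1, (calLoopB l l.sum 0).2) := by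
  induction l generalizing s1 with
  | nil => rw [calLoopA.eq_def]; simp [calLoopB]
  | cons h t ih =>
    rw [List.pairwise_cons] at hs
    by_cases hgt : (h :: t).sum > 150
    · have hmax := max?_cons_of_head_max h t hs.1
      have hidx := PySem.List.index?_cons_self h t
      have hpop : PySem.List.pop? (h :: t) ((0 : Nat) : Int) = some (h, t) := by
        simpa using PySem.List.pop?_zero_cons h t
      rw [calLoopA.eq_def, if_pos hgt]
      simp only [hmax, hidx]
      split
      · next heq => rw [hpop] at heq; cases heq
      next r heq =>
      rw [hpop] at heq
      injection heq with heq'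
      subst heq'
      have hnle : ¬ (h :: t).sum ≤ 150 := by omega
      conv_rhs => rw [show calLoopB (h :: t) (h :: t).sum 0 =
        calLoopB t ((h :: t).sum - h) (0 + 1) from by simp only [calLoopB, if_neg hnle]]
      rw [calLoopB_shift t ((h :: t).sum - h) (0 + 1)]
      have hsum : (h :: t).sum - h = t.sum := by simp [List.sum_cons]
      rw [hsum]
      show calLoopA t (s1 + 1) = _
      rw [ih hs.2 (s1 + 1)]
      refine Prod.ext ?_ ?_ <;> simp <;> ring
    · rw [calLoopA.eq_def, if_neg hgt]
      have hle : h + t.sum ≤ 150 := by simp [List.sum_cons] at hgt; omega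
      simp [calLoopB, hle, List.sum_cons]

-- ===== VERDICT (by name: the statement is the Claim_ definition above) =====
theorem cal_leave_amount_spec : Claim_equal_cal_leave_amount := by
  intro hours minutes _
  unfold Spec_cal_leave_amount cal_leave_amount cal_leave_amount_alt
  have hperm : minutes.Perm (PySem.List.sorted minutes (fun x => x) true) :=
    (PySem.List.sorted_perm minutes (fun x => x) true).symm
  have h1 := calLoopA_perm minutes.length minutes
    (PySem.List.sorted minutes (fun x => x) true) (le_refl _) hperm hours.sum
  have h2 := calLoopA_sorted (PySem.List.sorted minutes (fun x => x) true)
    (PySem.List.sorted_pairwise_rev minutes (fun x => x)) hours.sum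
  have hsum : (PySem.List.sorted minutes (fun x => x) true).sum = minutes.sum := hperm.symm.sum_eq
  rw [h1, h2, hsum]
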